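-- pv_equiv track=rewrite | github.com/rfm-targa/euTyper | euTyper.py | retrieve_allele_ID
-- ===== SOURCE A (Python) =====
-- def retrieve_allele_ID(CDS):
--     '''
--     retrieves the alllele ID. basicly inverts CDS_AA
--
--     :param CDS:
--         dict containgin sequentions seqID:seq
--
--     :return:
--         ID_SEQ: dict
--             dict containing sequentiosn and give it an unqie ID
--                 seq:id
--     '''
--
--     all_CDS = CDS.values()
--     all_CDS = list(dict.fromkeys(all_CDS))
--     ID_seq = {}
--     count=0
--     for seq in all_CDS:
--         count +=1
--         ID_seq[seq] = count
--
--     return(ID_seq)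
-- ===== SOURCE B (Python) =====
-- def retrieve_allele_ID(CDS):
--     vals = list(CDS.values())
--     first = {}
--     for i, seq in reversed(list(enumerate(vals))):
--         first[seq] = i
--     order = sorted(first, key=first.get)
--     return {seq: rank for rank, seq in enumerate(order, 1)}
-- ===== Notes on version B (the rewrite author's own statement) =====
-- stated objective: alternative
-- what changed: Replaces A's dedup-then-count (dict.fromkeys plus a counting loop) by a reverse overwrite pass that records each value's first-occurrence index, a sort of the keys by those indices, and an enumerate(...,1) comprehension; trades A's linear dedup for a sort of the distinct values.
import Mathlib
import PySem

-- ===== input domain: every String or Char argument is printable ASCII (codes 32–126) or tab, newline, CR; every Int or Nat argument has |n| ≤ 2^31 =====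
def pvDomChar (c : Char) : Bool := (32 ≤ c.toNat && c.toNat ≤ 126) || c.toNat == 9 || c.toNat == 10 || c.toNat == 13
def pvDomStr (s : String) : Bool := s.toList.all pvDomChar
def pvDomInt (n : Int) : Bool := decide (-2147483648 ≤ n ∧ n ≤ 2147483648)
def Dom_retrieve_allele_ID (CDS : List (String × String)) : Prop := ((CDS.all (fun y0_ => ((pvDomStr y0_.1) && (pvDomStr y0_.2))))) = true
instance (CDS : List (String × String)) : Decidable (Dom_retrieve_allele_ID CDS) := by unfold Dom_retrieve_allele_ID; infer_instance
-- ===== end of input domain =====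

-- B replaces A's dedup-then-count by a reverse overwrite pass recording first-occurrence
-- indices, a sort of the keys by those indices, and an enumerate comprehension; objective: alternative.

-- ===== PORT A =====
-- two passes: dedup the values (dict.fromkeys), then number them with a counter
def retrieve_allele_ID (CDS : List (String × String)) : List (String × Int) :=
  let all_CDS := (PySem.Dict.ofList CDS).values
  let all_CDS := PySem.List.dedup all_CDS
  (all_CDS.foldl
      (fun (st : PySem.Dict String Int × Int) seq =>
        (st.1.insert seq (st.2 + 1), st.2 + 1))
      (PySem.Dict.empty, 0)).1.items

-- ===== PORT B =====
-- reverse pass of overwrites first[seq] = i, then sort keys by first index, then number.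
-- Python's `key=first.get` is ported as `getD · 0`: exact here since sorted only iterates
-- the dict's own keys, on which get never returns None.
def retrieve_allele_ID_alt (CDS : List (String × String)) : List (String × Int) :=
  let vals := (PySem.Dict.ofList CDS).values
  let first := ((PySem.List.enumerate vals).reverse).foldl
      (fun (d : PySem.Dict String Int) p => d.insert p.2 p.1) PySem.Dict.empty
  let order := PySem.List.sorted first.keys (fun s => first.getD s 0) false
  ((PySem.List.enumerate order 1).foldl
      (fun (d : PySem.Dict String Int) p => d.insert p.2 p.1) PySem.Dict.empty).items

-- ===== PRECONDITION & SPEC =====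
def Spec_retrieve_allele_ID (CDS : List (String × String)) (out : List (String × Int)) : Prop := out = retrieve_allele_ID_alt CDS
instance (CDS : List (String × String)) (out : List (String × Int)) : Decidable (Spec_retrieve_allele_ID CDS out) := by unfold Spec_retrieve_allele_ID; infer_instance

-- ===== CLAIM (what is proved, stated in full; the proofs are below) =====
def Claim_equal_retrieve_allele_ID : Prop := ∀ (CDS : List (String × String)), Dom_retrieve_allele_ID CDS → Spec_retrieve_allele_ID CDS (retrieve_allele_ID CDS)

-- ===== LEMMAS AND PROOFS =====

-- A's counter fold is the insert fold over the 1-based enumeration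
lemma pvFoldA_eq (D : List String) : ∀ (d : PySem.Dict String Int) (n : Int),
    (D.foldl (fun (st : PySem.Dict String Int × Int) seq =>
        (st.1.insert seq (st.2 + 1), st.2 + 1)) (d, n)).1
      = (PySem.List.enumerate D (n + 1)).foldl
          (fun (d : PySem.Dict String Int) p => d.insert p.2 p.1) d := by
  induction D with
  | nil => intro d n; rfl
  | cons x xs ih =>
    intro d n
    simp only [List.foldl_cons, PySem.List.enumerate_cons]
    exact ih (d.insert x (n + 1)) (n + 1)

-- last write wins: lookup in an insert fold is the first match in the reversed list
lemma pvGet_foldl_insert (l : List (Int × String)) : ∀ (d : PySem.Dict String Int) (s : String),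
    (l.foldl (fun (d : PySem.Dict String Int) p => d.insert p.2 p.1) d).get? s
      = match l.reverse.find? (fun p => p.2 == s) with
        | some p => some p.1
        | none => d.get? s := by
  induction l with
  | nil => intro d s; rfl
  | cons p t ih =>
    intro d s
    simp only [List.foldl_cons, List.reverse_cons, List.find?_append, ih]
    cases h : t.reverse.find? (fun q => q.2 == s) with
    | some q => simp
    | none =>
      simp only [Option.none_or]
      by_cases hs : p.2 = s
      · subst hs; simp [List.find?, PySem.Dict.get?_insert_self]
      · have hbe : (p.2 == s) = false := by simp [hs]
        simp [List.find?, hbe, PySem.Dict.get?_insert_of_ne d p.1 (Ne.symm hs)]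

-- first match in the enumeration is the first-occurrence index
lemma pvFind_enumerate (vs : List String) : ∀ (n : Int) (s : String),
    (PySem.List.enumerate vs n).find? (fun p => p.2 == s)
      = if s ∈ vs then some ((n + (vs.idxOf s : Int), s)) else none := by
  induction vs with
  | nil => intro n s; simp [PySem.List.enumerate]
  | cons x xs ih =>
    intro n s
    simp only [PySem.List.enumerate_cons, List.find?]
    by_cases hx : x = s
    · subst hx; simp [List.idxOf_cons_self]
    · have hbe : (x == s) = false := by simp [hx]
      simp only [hbe, ih (n + 1) s]
      by_cases hm : s ∈ xs
      · have : s ∈ x :: xs := List.mem_cons_of_mem _ hm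
        simp only [hm, if_true, this, if_true]
        have : (x :: xs).idxOf s = xs.idxOf s + 1 := List.idxOf_cons_ne xs (by simpa using hx)
        rw [this]; push_cast; ring_nf
      · have : s ∉ x :: xs := by simp [Ne.symm hx, hm]
        simp [hm, this]

-- the first occurrences of `vs` not in `seen`, in order (used to characterise dedup)
def pvFresh (seen : List String) : List String → List String
  | [] => []
  | x :: xs => if x ∈ seen then pvFresh seen xs else x :: pvFresh (seen ++ [x]) xs

lemma pvFresh_mem (vs : List String) : ∀ (s : List String) (a : String),
    a ∈ pvFresh s vs → a ∈ vs ∧ a ∉ s := by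
  induction vs with
  | nil => intro s a h; simp [pvFresh] at h
  | cons x xs ih =>
    intro s a h
    simp only [pvFresh] at h
    by_cases hx : x ∈ s
    · rw [if_pos hx] at h
      obtain ⟨h1, h2⟩ := ih s a h
      exact ⟨List.mem_cons_of_mem _ h1, h2⟩
    · rw [if_neg hx] at h
      rcases List.mem_cons.mp h with rfl | h
      · exact ⟨List.mem_cons_self, hx⟩
      · obtain ⟨h1, h2⟩ := ih _ a h
        refine ⟨List.mem_cons_of_mem _ h1, fun hc => h2 (by simp [hc])⟩

-- a set-building fold is `seen ++` the fresh elements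
lemma pvFoldl_add_eq_pvFresh (vs : List String) : ∀ (s : List String),
    vs.foldl PySem.Set.add s = s ++ pvFresh s vs := by
  induction vs with
  | nil => intro s; simp [pvFresh]
  | cons x xs ih =>
    intro s
    simp only [List.foldl_cons, pvFresh]
    by_cases hx : x ∈ s
    · rw [if_pos hx, PySem.Set.add_of_mem hx]; exact ih s
    · rw [if_neg hx, PySem.Set.add_of_not_mem hx, ih (s ++ [x]), List.append_assoc,
        List.singleton_append]

-- idxOf over an append when the element avoids the prefix
lemma pvIdxOf_append (pre suf : List String) (a : String) (h : a ∉ pre) :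
    (pre ++ suf).idxOf a = pre.length + suf.idxOf a := by
  induction pre with
  | nil => simp
  | cons x xs ih =>
    have hax : x ≠ a := fun hc => h (by simp [hc])
    simp only [List.cons_append, List.idxOf_cons_ne _ (by simpa using hax),
      ih (fun hc => h (List.mem_cons_of_mem _ hc)), List.length_cons]
    omega

-- dedup (= pvFresh [] vals) is strictly increasing in first-occurrence index
lemma pvFresh_pairwise_idxOf (vals : List String) : ∀ (suf pre seen : List String),
    vals = pre ++ suf → (∀ y, y ∈ seen ↔ y ∈ pre) →
    (pvFresh seen suf).Pairwise (fun a b => vals.idxOf a < vals.idxOf b) := by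
  intro suf
  induction suf with
  | nil => intro pre seen _ _; simp [pvFresh]
  | cons x xs ih =>
    intro pre seen hv hs
    simp only [pvFresh]
    by_cases hx : x ∈ seen
    · rw [if_pos hx]
      exact ih (pre ++ [x]) seen (by simp [hv]) (fun y =>
        ⟨fun h => List.mem_append_left _ ((hs y).mp h),
         fun h => by
          rcases List.mem_append.mp h with h | h
          · exact (hs y).mpr h
          · simp only [List.mem_singleton] at h; exact h ▸ hx⟩)
    · rw [if_neg hx]
      have hxpre : x ∉ pre := fun hc => hx ((hs x).mpr hc)
      have hidx : vals.idxOf x = pre.length := by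
        rw [hv, pvIdxOf_append _ _ _ hxpre, List.idxOf_cons_self]; omega
      refine List.pairwise_cons.mpr ⟨?_, ?_⟩
      · intro b hb
        obtain ⟨hbxs, hbs⟩ := pvFresh_mem xs (seen ++ [x]) b hb
        have hbpre : b ∉ pre ++ [x] := fun hc => by
          rcases List.mem_append.mp hc with hc | hc
          · exact hbs (by simp [(hs b).mpr hc])
          · exact hbs (by simp at hc; simp [hc])
        have : vals.idxOf b = (pre ++ [x]).length + xs.idxOf b := by
          rw [hv, show pre ++ x :: xs = (pre ++ [x]) ++ xs by simp, pvIdxOf_append _ _ _ hbpre]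
        rw [this, hidx]
        simp only [List.length_append, List.length_cons, List.length_nil]
        omega
      · exact ih (pre ++ [x]) (seen ++ [x]) (by simp [hv]) (fun y => by
          simp only [List.mem_append, List.mem_singleton]
          exact or_congr_left (hs y))

-- B's `first` dict is keyed by the distinct values and looks up first-occurrence indices,
-- so B's sorted key list is exactly the dedup order
lemma pvB_order (vals : List String) :
    PySem.List.sorted
      (((PySem.List.enumerate vals).reverse).foldl
          (fun (d : PySem.Dict String Int) p => d.insert p.2 p.1) PySem.Dict.empty).keys
      (fun s => (((PySem.List.enumerate vals).reverse).foldl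
          (fun (d : PySem.Dict String Int) p => d.insert p.2 p.1) PySem.Dict.empty).getD s 0)
      false
    = PySem.List.dedup vals := by
  set first := ((PySem.List.enumerate vals).reverse).foldl
      (fun (d : PySem.Dict String Int) p => d.insert p.2 p.1) PySem.Dict.empty with hfirst
  have hded : PySem.List.dedup vals = pvFresh [] vals := by
    rw [PySem.List.dedup_eq_ofList, PySem.Set.ofList_eq_foldl, pvFoldl_add_eq_pvFresh,
      List.nil_append]
  have hget : ∀ s ∈ vals, first.get? s = some ((vals.idxOf s : Int)) := by
    intro s hsv
    rw [hfirst, pvGet_foldl_insert, List.reverse_reverse, pvFind_enumerate, if_pos hsv]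
    simp
  have hkeys : first.keys = PySem.Set.ofList vals.reverse := by
    have h := PySem.Dict.keys_foldl_insert_key (ν := Int)
      ((PySem.List.enumerate vals).reverse) (fun p => p.2) (fun _ p => p.1) PySem.Dict.empty
    simpa [PySem.Set.update, PySem.Set.ofList_eq_foldl, PySem.Dict.keys_empty,
      PySem.List.map_snd_enumerate, hfirst] using h
  apply PySem.List.sorted_eq_of_perm_of_pairwise_lt
  · -- dedup vals ~ first.keys
    rw [hkeys]
    refine (List.perm_ext_iff_of_nodup (PySem.List.nodup_dedup vals)
      (PySem.Set.nodup_ofList _)).mpr (fun a => ?_)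
    simp
  · -- strictly increasing key along dedup vals
    rw [hded]
    refine (pvFresh_pairwise_idxOf vals vals [] [] rfl (by simp)).imp_of_mem ?_
    intro a b ha hb hlt
    rw [← hded] at ha hb
    have hav : a ∈ vals := (PySem.List.mem_dedup vals a).mp ha
    have hbv : b ∈ vals := (PySem.List.mem_dedup vals b).mp hb
    rw [PySem.Dict.getD_eq_get?_getD, PySem.Dict.getD_eq_get?_getD,
      hget a hav, hget b hbv]
    simpa using hlt

-- main equation
theorem pv_main (CDS : List (String × String)) :
    retrieve_allele_ID CDS = retrieve_allele_ID_alt CDS := by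
  unfold retrieve_allele_ID retrieve_allele_ID_alt
  simp only [pvB_order, pvFoldA_eq]
  norm_num

-- ===== VERDICT (by name: the statement is the Claim_ definition above) =====
theorem retrieve_allele_ID_spec : Claim_equal_retrieve_allele_ID := by
  intro CDS _
  exact (pv_main CDS).symm ▸ rfl
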